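-- pv_equiv track=rewrite | github.com/huggin/gfg | bit/numbers_having_alternate_bits.py | count
-- ===== SOURCE A (Python) =====
-- def count(N):
--     # code here
--     ans = []
--     n = 1
--     m = 0
--     while n <= N:
--         ans.append(n)
--         n = (n << 1) + m
--         m = 1 - m
--     return ans
-- ===== SOURCE B (Python) =====
-- def count(N):
--     # closed form: the k-bit alternating number is (2**(k+1) - 1)//3 for odd k,
--     # (2**(k+1) - 2)//3 for even k; emit them in order of bit-length.
--     ans = []
--     k = 1
--     while True:
--         val = (2 ** (k + 1) - (1 if k % 2 == 1 else 2)) // 3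
--         if val > N:
--             return ans
--         ans.append(val)
--         k += 1
-- ===== Notes on version B (the rewrite author's own statement) =====
-- stated objective: alternative
-- what changed: Each alternating-bit number is computed directly from its bit-length k by a closed form (floor of (2^(k+1) minus one or two, by the parity of k) over three), replacing A's shift-and-toggle accumulator that derives each term from the previous one.
import Mathlib
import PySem

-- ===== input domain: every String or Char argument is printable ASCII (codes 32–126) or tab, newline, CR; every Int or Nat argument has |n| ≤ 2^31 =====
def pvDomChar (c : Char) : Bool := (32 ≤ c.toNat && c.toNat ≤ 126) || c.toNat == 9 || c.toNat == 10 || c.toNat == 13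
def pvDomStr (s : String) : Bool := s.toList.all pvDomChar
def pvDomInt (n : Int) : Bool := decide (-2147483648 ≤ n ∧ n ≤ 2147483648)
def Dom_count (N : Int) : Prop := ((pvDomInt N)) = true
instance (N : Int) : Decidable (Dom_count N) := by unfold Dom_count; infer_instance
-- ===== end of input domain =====

-- B replaces A's shift-and-toggle accumulator by the closed form for each alternating
-- number of bit-length k ((2^(k+1)-1)//3 for odd k, (2^(k+1)-2)//3 for even k); objective: alternative.

-- ===== PORT A =====
-- A's while loop; n strictly grows (invariants 1 ≤ n, 0 ≤ m ≤ 1 carried for termination).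
def countLoopA (N n m : Int) (hn : 1 ≤ n) (hm : 0 ≤ m ∧ m ≤ 1) : List Int :=
  if h : n ≤ N then
    -- ans.append(n); n = (n << 1) + m  (n << 1 = n * 2 on ints, exact); m = 1 - m
    n :: countLoopA N (n * 2 + m) (1 - m) (by omega) (by omega)
  else []
termination_by (N + 1 - n).toNat
decreasing_by omega

def count (N : Int) : List Int := countLoopA N 1 0 (by omega) (by omega)

-- ===== PORT B =====
-- val = (2 ** (k + 1) - (1 if k % 2 == 1 else 2)) // 3
def bval (k : Nat) : Int :=
  PySem.Int.floordiv ((2 : Int) ^ (k + 1) - (if k % 2 = 1 then 1 else 2)) 3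

theorem bval_lt (k : Nat) : bval k < bval (k + 1) := by
  have h3 : (3:Int) ∣ (2 : Int) ^ (k + 1) - (if k % 2 = 1 then 1 else 2) := by
    induction k with
    | zero => decide
    | succ n ih =>
      have : (2 : Int) ^ (n + 1 + 1) = 2 * 2 ^ (n + 1) := by ring
      rw [this]
      rcases Nat.mod_two_eq_zero_or_one n with h | h <;>
        simp [h, Nat.succ_mod_two_eq_one_iff, Nat.succ_mod_two_eq_zero_iff] at * <;> omega
  have h3' : (3:Int) ∣ (2 : Int) ^ (k + 1 + 1) - (if (k+1) % 2 = 1 then 1 else 2) := by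
    have : (2 : Int) ^ (k + 1 + 1) = 2 * 2 ^ (k + 1) := by ring
    rw [this]
    rcases Nat.mod_two_eq_zero_or_one k with h | h <;>
      simp [h, Nat.succ_mod_two_eq_one_iff, Nat.succ_mod_two_eq_zero_iff] at * <;> omega
  have hp : (2:Int) ≤ 2 ^ (k + 1) := by
    calc (2:Int) = 2 ^ 1 := by norm_num
    _ ≤ 2 ^ (k + 1) := by apply pow_le_pow_right₀ <;> omega
  have e1 := PySem.Int.floordiv_mul_add_mod ((2 : Int) ^ (k + 1) - (if k % 2 = 1 then 1 else 2)) 3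
  have e2 := PySem.Int.floordiv_mul_add_mod ((2 : Int) ^ (k + 1 + 1) - (if (k+1) % 2 = 1 then 1 else 2)) 3
  have m1 : PySem.Int.mod ((2 : Int) ^ (k + 1) - (if k % 2 = 1 then 1 else 2)) 3 = 0 := by
    rw [PySem.Int.mod_eq_zero_iff_dvd] <;> omega
  have m2 : PySem.Int.mod ((2 : Int) ^ (k + 1 + 1) - (if (k+1) % 2 = 1 then 1 else 2)) 3 = 0 := by
    rw [PySem.Int.mod_eq_zero_iff_dvd] <;> omega
  have hpow : (2 : Int) ^ (k + 1 + 1) = 2 * 2 ^ (k + 1) := by ring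
  unfold bval
  rcases Nat.mod_two_eq_zero_or_one k with h | h <;>
    simp [h, Nat.succ_mod_two_eq_one_iff, Nat.succ_mod_two_eq_zero_iff] at * <;> omega

def countLoopB (N : Int) (k : Nat) : List Int :=
  if h : bval k ≤ N then bval k :: countLoopB N (k + 1) else []
termination_by (N + 1 - bval k).toNat
decreasing_by have := bval_lt k; omega

def count_alt (N : Int) : List Int := countLoopB N 1

-- ===== PRECONDITION & SPEC =====
def Spec_count (N : Int) (out : List Int) : Prop := out = count_alt N
instance (N : Int) (out : List Int) : Decidable (Spec_count N out) := by unfold Spec_count; infer_instance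

-- ===== CLAIM (what is proved, stated in full; the proofs are below) =====
def Claim_equal_count : Prop := ∀ (N : Int), Dom_count N → Spec_count N (count N)

-- ===== LEMMAS AND PROOFS =====

-- A's state at step k (k ≥ 1) is n = bval k, m = (k+1) % 2.
theorem bval_succ (k : Nat) : bval (k + 1) = 2 * bval k + (((k + 1) % 2 : Nat) : Int) := by
  have h3 : (3:Int) ∣ (2 : Int) ^ (k + 1) - (if k % 2 = 1 then 1 else 2) := by
    induction k with
    | zero => decide
    | succ n ih =>
      have : (2 : Int) ^ (n + 1 + 1) = 2 * 2 ^ (n + 1) := by ring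
      rw [this]
      rcases Nat.mod_two_eq_zero_or_one n with h | h <;>
        simp [h, Nat.succ_mod_two_eq_one_iff, Nat.succ_mod_two_eq_zero_iff] at * <;> omega
  have h3' : (3:Int) ∣ (2 : Int) ^ (k + 1 + 1) - (if (k+1) % 2 = 1 then 1 else 2) := by
    have : (2 : Int) ^ (k + 1 + 1) = 2 * 2 ^ (k + 1) := by ring
    rw [this]
    rcases Nat.mod_two_eq_zero_or_one k with h | h <;>
      simp [h, Nat.succ_mod_two_eq_one_iff, Nat.succ_mod_two_eq_zero_iff] at * <;> omega
  have e1 := PySem.Int.floordiv_mul_add_mod ((2 : Int) ^ (k + 1) - (if k % 2 = 1 then 1 else 2)) 3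
  have e2 := PySem.Int.floordiv_mul_add_mod ((2 : Int) ^ (k + 1 + 1) - (if (k+1) % 2 = 1 then 1 else 2)) 3
  have m1 : PySem.Int.mod ((2 : Int) ^ (k + 1) - (if k % 2 = 1 then 1 else 2)) 3 = 0 := by
    rw [PySem.Int.mod_eq_zero_iff_dvd] <;> omega
  have m2 : PySem.Int.mod ((2 : Int) ^ (k + 1 + 1) - (if (k+1) % 2 = 1 then 1 else 2)) 3 = 0 := by
    rw [PySem.Int.mod_eq_zero_iff_dvd] <;> omega
  have hpow : (2 : Int) ^ (k + 1 + 1) = 2 * 2 ^ (k + 1) := by ring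
  have hc : (((k + 1) % 2 : Nat) : Int) = if k % 2 = 1 then 0 else 1 := by
    rcases Nat.mod_two_eq_zero_or_one k with h | h
    · have h2 : (k + 1) % 2 = 1 := by omega
      simp [h2, h]
    · have h2 : (k + 1) % 2 = 0 := by omega
      simp [h2, h]
  unfold bval
  rw [hc]
  rcases Nat.mod_two_eq_zero_or_one k with h | h <;>
    simp [h, Nat.succ_mod_two_eq_one_iff, Nat.succ_mod_two_eq_zero_iff] at * <;> omega

theorem bval_pos (k : Nat) : 1 ≤ bval (k + 1) := by
  induction k with
  | zero => decide
  | succ n ih => have := bval_lt (n + 1); omega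

theorem mkk (k : Nat) : (0:Int) ≤ (((k + 1) % 2 : Nat) : Int) ∧ (((k + 1) % 2 : Nat) : Int) ≤ 1 := by
  constructor <;> [exact Int.natCast_nonneg _; exact_mod_cast Nat.le_of_lt_succ (Nat.mod_lt _ (by omega))]

theorem loop_eq (N : Int) (k : Nat) :
    countLoopA N (bval (k + 1)) (((k + 1 + 1) % 2 : Nat) : Int) (bval_pos k) (mkk (k+1)) =
      countLoopB N (k + 1) := by
  rw [countLoopA, countLoopB]
  by_cases h : bval (k + 1) ≤ N
  · simp only [h, dif_pos]
    have harg : bval (k + 1) * 2 + (((k + 1 + 1) % 2 : Nat) : Int) = bval (k + 1 + 1) := by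
      rw [bval_succ (k + 1)]; ring
    have hm : (1:Int) - (((k + 1 + 1) % 2 : Nat) : Int) = (((k + 1 + 1 + 1) % 2 : Nat) : Int) := by
      have h2 := Nat.mod_two_eq_zero_or_one (k + 1 + 1)
      have h3 : (k + 1 + 1 + 1) % 2 = 1 - (k + 1 + 1) % 2 := by omega
      rcases h2 with h2 | h2 <;> simp [h2, h3]
    have hb := bval_pos k
    have : countLoopA N (bval (k + 1) * 2 + (((k + 1 + 1) % 2 : Nat) : Int))
        (1 - (((k + 1 + 1) % 2 : Nat) : Int)) (by omega) (by omega) =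
        countLoopA N (bval (k + 1 + 1)) (((k + 1 + 1 + 1) % 2 : Nat) : Int) (bval_pos (k+1)) (mkk (k+1+1)) := by
      congr 1
    rw [this, loop_eq N (k + 1)]
  · simp only [h, dif_neg, not_false_iff]
termination_by (N + 1 - bval (k + 1)).toNat
decreasing_by have := bval_lt (k + 1); omega

-- ===== VERDICT (by name: the statement is the Claim_ definition above) =====
theorem count_spec : Claim_equal_count := by
  intro N _
  show count N = count_alt N
  have h := loop_eq N 0
  unfold count count_alt
  have h1 : bval 1 = 1 := by decide
  have h0 : (((0 + 1 + 1) % 2 : Nat) : Int) = 0 := by decide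
  rw [show countLoopA N 1 0 (by omega) (by omega) =
      countLoopA N (bval 1) (((0 + 1 + 1) % 2 : Nat) : Int) (bval_pos 0) (mkk 1) from by
    congr 1 <;> decide]
  exact h
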